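-- pv_equiv track=rewrite | github.com/official-Trippy/flask-server | api/recommend.py | remove_consecutive_words
-- ===== SOURCE A (Python) =====
-- def remove_consecutive_words(s):
--     result = []
--     count = 1
--
--     if s:
--         result.append(s[0])
--
--     for i in range(1, len(s)):
--         if s[i] == s[i-1]:
--             count += 1
--         else:
--             count = 1
--
--         if count < 3:
--             result.append(s[i])
--
--     return ''.join(result)
-- ===== SOURCE B (Python) =====
-- from itertools import groupby
--
-- def remove_consecutive_words(s):
--     return ''.join(c * min(len(list(g)), 2) for c, g in groupby(s))
-- ===== Notes on version B (the rewrite author's own statement) =====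
-- stated objective: idiomatic
-- what changed: Replaces the index loop with a prev-comparison and running count by itertools.groupby: the string is split into maximal runs and each run contributes min(len,2) copies of its character.
import Mathlib
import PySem

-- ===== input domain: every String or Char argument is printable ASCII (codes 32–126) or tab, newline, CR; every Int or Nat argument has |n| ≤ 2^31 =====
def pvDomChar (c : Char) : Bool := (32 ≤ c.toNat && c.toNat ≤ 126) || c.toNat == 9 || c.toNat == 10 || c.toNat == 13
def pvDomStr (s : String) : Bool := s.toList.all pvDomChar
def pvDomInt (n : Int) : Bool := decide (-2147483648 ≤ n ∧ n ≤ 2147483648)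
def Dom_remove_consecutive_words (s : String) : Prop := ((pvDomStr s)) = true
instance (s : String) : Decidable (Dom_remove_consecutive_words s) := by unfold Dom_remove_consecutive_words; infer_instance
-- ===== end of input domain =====

-- B groups the string into maximal runs (itertools.groupby) and emits min(len,2) copies per run,
-- instead of A's char-by-char loop with a running duplicate count; same output, proved equal.

-- ===== PORT A =====
-- A's for-loop over i in range(1, len(s)) compares s[i] with s[i-1]; ported as a
-- recursion over the tail of the character list carrying (prev, count, result).
def pvGoA (prev : Char) (count : Int) (acc : List Char) : List Char → List Char
  | [] => acc
  | c :: rest =>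
    let count' := if c == prev then count + 1 else 1
    let acc' := if count' < 3 then acc ++ [c] else acc
    pvGoA c count' acc' rest

def remove_consecutive_words (s : String) : String :=
  match s.toList with
  | [] => ""
  | c :: rest => String.mk (pvGoA c 1 [c] rest)

-- ===== PORT B =====
-- itertools.groupby(s): the list of maximal runs, as (character, run length).
def pvRuns : List Char → List (Char × Nat)
  | [] => []
  | c :: rest =>
    (c, (rest.takeWhile (· == c)).length + 1) :: pvRuns (rest.dropWhile (· == c))
termination_by l => l.length
decreasing_by
  exact Nat.lt_succ_of_le (List.length_dropWhile_le _ _)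

def remove_consecutive_words_alt (s : String) : String :=
  String.mk ((pvRuns s.toList).flatMap (fun p => List.replicate (min p.2 2) p.1))

-- ===== PRECONDITION & SPEC =====
def Spec_remove_consecutive_words (s : String) (out : String) : Prop := out = remove_consecutive_words_alt s
instance (s : String) (out : String) : Decidable (Spec_remove_consecutive_words s out) := by unfold Spec_remove_consecutive_words; infer_instance

-- ===== CLAIM (what is proved, stated in full; the proofs are below) =====
def Claim_equal_remove_consecutive_words : Prop := ∀ (s : String), Dom_remove_consecutive_words s → Spec_remove_consecutive_words s (remove_consecutive_words s)

-- ===== LEMMAS AND PROOFS =====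

theorem pvGoA_acc (rest : List Char) : ∀ (prev : Char) (count : Int) (acc : List Char),
    pvGoA prev count acc rest = acc ++ pvGoA prev count [] rest := by
  induction rest with
  | nil => intro prev count acc; simp [pvGoA]
  | cons c rest ih =>
    intro prev count acc
    simp only [pvGoA]
    split_ifs with h1 h2
    · rw [ih c (count + 1) (acc ++ [c])]
      simp only [List.nil_append]
      rw [ih c (count + 1) [c]]; simp
    · exact ih c (count + 1) acc
    · rw [ih c 1 (acc ++ [c])]
      simp only [List.nil_append]
      rw [ih c 1 [c]]; simp
    · exact ih c 1 acc

theorem pvTake_replicate (c : Char) (l : List Char) (h : ∀ x ∈ l, x = c) :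
    l.take 1 = List.replicate (min l.length 1) c := by
  cases l with
  | nil => simp
  | cons x t =>
    have : x = c := h x (by simp)
    simp [this]

theorem pvCons_replicate (c : Char) (m : Nat) (F : List Char) :
    c :: (List.replicate m c ++ F) = List.replicate m c ++ c :: F := by
  induction m with
  | zero => simp
  | succ n ih =>
    simp only [List.replicate_succ, List.cons_append]
    rw [ih]

theorem pvGoA_runs (rest : List Char) : ∀ (prev : Char) (count : Int), 1 ≤ count →
    pvGoA prev count [] rest =
      (if count = 1 then (rest.takeWhile (· == prev)).take 1 else []) ++
      (pvRuns (rest.dropWhile (· == prev))).flatMap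
        (fun p => List.replicate (min p.2 2) p.1) := by
  induction rest with
  | nil => intro prev count _; simp [pvGoA, pvRuns]
  | cons c rest ih =>
    intro prev count hc
    by_cases hcp : c = prev
    · subst hcp
      simp only [pvGoA, beq_self_eq_true, if_pos, List.takeWhile_cons,
        List.dropWhile_cons]
      rw [pvGoA_acc]
      rw [ih c (count + 1) (by omega)]
      have hne : ¬ (count + 1 = 1) := by omega
      simp only [hne, if_false, List.nil_append]
      split_ifs with h1 h2
      · -- count + 1 < 3 and count = 1
        simp
      · -- count + 1 < 3, count ≠ 1 : impossible? count ≥ 1, count+1<3 → count=1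
        omega
      · -- ¬(count+1<3) and count = 1 : impossible
        omega
      · simp
    · have hbe : (c == prev) = false := by simp [hcp]
      simp only [pvGoA, hbe, List.takeWhile_cons, List.dropWhile_cons,
        Int.lt_iff_add_one_le]
      norm_num
      rw [pvGoA_acc, ih c 1 (by omega)]
      rw [show pvRuns (c :: rest) = (c, (rest.takeWhile (· == c)).length + 1) ::
        pvRuns (rest.dropWhile (· == c)) from by rw [pvRuns]]
      simp only [List.flatMap_cons, if_true]
      have hmin : min ((rest.takeWhile (· == c)).length + 1) 2 =
          min (rest.takeWhile (· == c)).length 1 + 1 := by omega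
      rw [hmin, List.replicate_succ']
      have ht : (rest.takeWhile (· == c)).take 1 =
          List.replicate (min (rest.takeWhile (· == c)).length 1) c := by
        apply pvTake_replicate
        intro x hx
        have := List.takeWhile_subset (p := (· == c)) hx
        have := List.mem_takeWhile_imp hx
        simpa using this
      rw [ht]
      simp only [List.singleton_append, List.append_assoc]
      exact pvCons_replicate c _ _

-- ===== VERDICT (by name: the statement is the Claim_ definition above) =====
theorem remove_consecutive_words_spec : Claim_equal_remove_consecutive_words := by
  intro s _
  unfold Spec_remove_consecutive_words remove_consecutive_words remove_consecutive_words_alt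
  cases hl : s.toList with
  | nil =>
    rw [show pvRuns ([] : List Char) = [] from by rw [pvRuns]]
    rfl
  | cons c rest =>
    show String.mk (pvGoA c 1 [c] rest) = _
    rw [show pvGoA c 1 [c] rest = [c] ++ pvGoA c 1 [] rest from pvGoA_acc rest c 1 [c]]
    rw [pvGoA_runs rest c 1 (by omega)]
    rw [show pvRuns (c :: rest) = (c, (rest.takeWhile (· == c)).length + 1) ::
      pvRuns (rest.dropWhile (· == c)) from by rw [pvRuns]]
    simp only [List.flatMap_cons]
    have hmin : min ((rest.takeWhile (· == c)).length + 1) 2 =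
        min (rest.takeWhile (· == c)).length 1 + 1 := by omega
    rw [hmin, List.replicate_succ']
    have ht : (rest.takeWhile (· == c)).take 1 =
        List.replicate (min (rest.takeWhile (· == c)).length 1) c := by
      apply pvTake_replicate
      intro x hx
      have := List.mem_takeWhile_imp hx
      simpa using this
    rw [ht]
    simp only [if_true, List.singleton_append, List.append_assoc]
    exact congrArg String.mk (pvCons_replicate c _ _)
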